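-- pv_equiv track=rewrite | github.com/mileoa/28tasks | UFO/UFO.py | UFO
-- ===== SOURCE A (Python) =====
-- OCTAL_BASE = 8
--
-- HEXADECIMAL_BASE = 16
--
-- def list_int(num: int) -> list[int]:
--     """List int by digits."""
--     result: list[int] = []
--     while num > 0:
--         result.append(num % 10)
--         num = num // 10
--     result.reverse()
--     return result
--
-- def convert_to_dec(num: int, base: int) -> int:
--     """Convert to decimical."""
--     digits: list[int] = list_int(num)
--     result: int = 0
--     for i, digit in enumerate(digits):
--         result += digit * base ** (len(digits) - 1 - i)
--     return result
--
-- def UFO(N: int, data: list[int], octal: bool) -> list[int]: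
--     """Return converted UFO sygnal."""
--     base: int = 0
--     if octal:
--         base = OCTAL_BASE
--     else:
--         base = HEXADECIMAL_BASE
--
--     result: list[int] = []
--     for i in range(N):
--         result.append(convert_to_dec(data[i], base))
--     return result
-- ===== SOURCE B (Python) =====
-- OCTAL_BASE = 8
--
-- HEXADECIMAL_BASE = 16
--
--
-- def UFO(N: int, data: list[int], octal: bool) -> list[int]:
--     """Return converted UFO sygnal."""
--     base = OCTAL_BASE if octal else HEXADECIMAL_BASE
--
--     def conv(num: int) -> int:
--         if num <= 0:
--             return 0
--         return conv(num // 10) * base + num % 10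
--
--     return [conv(data[i]) for i in range(N)]
-- ===== Notes on version B (the rewrite author's own statement) =====
-- stated objective: simpler
-- what changed: Replaces the digit-list extraction + reverse + positional power sum (three helpers) with a single recursive Horner conversion conv(n) = conv(n//10)*base + n%10 applied in a comprehension, removing the digit list, the reverse and the per-digit power computation.
import Mathlib
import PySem

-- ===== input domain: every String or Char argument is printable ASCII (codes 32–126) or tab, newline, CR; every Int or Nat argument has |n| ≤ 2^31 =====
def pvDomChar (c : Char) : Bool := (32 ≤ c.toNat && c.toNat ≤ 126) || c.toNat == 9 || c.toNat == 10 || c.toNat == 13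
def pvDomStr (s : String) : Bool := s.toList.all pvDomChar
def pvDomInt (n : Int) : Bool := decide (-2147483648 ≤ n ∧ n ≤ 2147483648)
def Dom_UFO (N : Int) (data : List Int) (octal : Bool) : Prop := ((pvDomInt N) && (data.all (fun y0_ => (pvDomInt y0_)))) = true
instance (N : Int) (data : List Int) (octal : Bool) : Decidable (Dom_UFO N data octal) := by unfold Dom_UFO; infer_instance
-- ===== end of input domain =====

-- B collapses A's digit-list extraction + reverse + power sum into one recursive
-- Horner conversion mapped over a slice; objective: simpler (same asymptotics).

-- termination measure for the digit loops
theorem pvDiv10_lt (num : Int) (h : 0 < num) :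
    (PySem.Int.floordiv num 10).toNat < num.toNat := by
  rw [PySem.Int.floordiv_eq_ediv_of_pos (by omega)]
  omega

-- ===== PORT A =====
-- while num > 0: result.append(num % 10); num //= 10
def pvListIntGo (num : Int) (acc : List Int) : List Int :=
  if h : 0 < num then
    pvListIntGo (PySem.Int.floordiv num 10) (acc ++ [PySem.Int.mod num 10])
  else acc
termination_by num.toNat
decreasing_by exact pvDiv10_lt num h

def pvListInt (num : Int) : List Int := (pvListIntGo num []).reverse

-- result += digit * base ** (len(digits) - 1 - i)   (the exponent is a nonnegative int in Python)
def pvConvertToDec (num : Int) (base : Int) : Int :=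
  let digits := pvListInt num
  (PySem.List.enumerate digits 0).foldl
    (fun r p => r + p.2 * base ^ (((digits.length : Int) - 1 - p.1).toNat)) 0

def UFO (N : Int) (data : List Int) (octal : Bool) : List Int :=
  let base : Int := if octal then 8 else 16
  (PySem.List.pyRange 0 N 1).foldl
    (fun res i => res ++ [pvConvertToDec (PySem.List.pyGetD data i 0) base]) []

-- ===== PORT B =====
def pvConv (base : Int) (num : Int) : Int :=
  if num ≤ 0 then 0
  else pvConv base (PySem.Int.floordiv num 10) * base + PySem.Int.mod num 10
termination_by num.toNat
decreasing_by exact pvDiv10_lt num (by omega)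

def UFO_alt (N : Int) (data : List Int) (octal : Bool) : List Int :=
  let base : Int := if octal then 8 else 16
  (PySem.List.pyRange 0 N 1).map (fun i => pvConv base (PySem.List.pyGetD data i 0))

-- ===== PRECONDITION & SPEC =====
-- Pre_ excludes exactly N > len(data), where A raises IndexError on data[i].
def Pre_UFO (N : Int) (data : List Int) (octal : Bool) : Prop := N ≤ (data.length : Int)
instance (N : Int) (data : List Int) (octal : Bool) : Decidable (Pre_UFO N data octal) := by
  unfold Pre_UFO; infer_instance

def pvWitness_UFO : Int × List Int × Bool := (2, [17, 23], true)

def Spec_UFO (N : Int) (data : List Int) (octal : Bool) (out : List Int) : Prop := out = UFO_alt N data octal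
instance (N : Int) (data : List Int) (octal : Bool) (out : List Int) : Decidable (Spec_UFO N data octal out) := by unfold Spec_UFO; infer_instance

-- ===== CLAIM (what is proved, stated in full; the proofs are below) =====
def Claim_equal_UFO : Prop := ∀ (N : Int) (data : List Int) (octal : Bool), Dom_UFO N data octal → Pre_UFO N data octal → Spec_UFO N data octal (UFO N data octal)


-- ===== LEMMAS AND PROOFS =====

-- least-significant-first digit list, as a plain cons recursion
def pvLsd (num : Int) : List Int :=
  if h : 0 < num then PySem.Int.mod num 10 :: pvLsd (PySem.Int.floordiv num 10) else []
termination_by num.toNat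
decreasing_by exact pvDiv10_lt num h

theorem pvListIntGo_eq (num : Int) : ∀ acc, pvListIntGo num acc = acc ++ pvLsd num := by
  induction num using pvLsd.induct with
  | case1 num h ih =>
      intro acc
      rw [pvListIntGo, pvLsd, dif_pos h, dif_pos h, ih]
      simp
  | case2 num h =>
      intro acc
      rw [pvListIntGo, pvLsd, dif_neg h, dif_neg h]
      simp

-- value of a least-significant-first digit list
def pvVal (base : Int) : List Int → Int
  | [] => 0
  | d :: ds => d + base * pvVal base ds

-- most-significant-first Horner fold
def pvH (base : Int) (ds : List Int) : Int := ds.foldl (fun r d => r * base + d) 0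

theorem pvH_foldl_acc (base : Int) (ds : List Int) :
    ∀ a, ds.foldl (fun r d => r * base + d) a = a * base ^ ds.length + pvH base ds := by
  induction ds with
  | nil => intro a; unfold pvH; simp
  | cons d ds ih =>
      intro a
      simp only [List.foldl_cons, ih]
      rw [show pvH base (d :: ds) = ds.foldl (fun r d => r * base + d) (0 * base + d) from rfl,
        ih]
      simp only [List.length_cons]
      ring

theorem pvVal_eq_H_rev (base : Int) (L : List Int) : pvVal base L = pvH base L.reverse := by
  induction L with
  | nil => simp [pvVal, pvH]
  | cons d ds ih =>
      rw [show pvVal base (d :: ds) = d + base * pvVal base ds from rfl, ih, List.reverse_cons,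
        show pvH base (ds.reverse ++ [d])
          = (ds.reverse ++ [d]).foldl (fun r d => r * base + d) 0 from rfl,
        List.foldl_append, List.foldl_cons, List.foldl_nil, pvH_foldl_acc]
      ring

theorem pvConv_eq_val (base num : Int) : pvConv base num = pvVal base (pvLsd num) := by
  induction num using pvLsd.induct with
  | case1 num h ih =>
      rw [pvConv, if_neg (show ¬ num ≤ 0 by omega), pvLsd, dif_pos h,
        show pvVal base (PySem.Int.mod num 10 :: pvLsd (PySem.Int.floordiv num 10))
          = PySem.Int.mod num 10 + base * pvVal base (pvLsd (PySem.Int.floordiv num 10)) from rfl,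
        ih]
      ring
  | case2 num h =>
      rw [pvConv, if_pos (show num ≤ 0 by omega), pvLsd, dif_neg h]
      rfl

-- the positional power sum over an enumerated msf list is the Horner fold
theorem pvSumPow (base : Int) (D : List Int) :
    ∀ (s C : Int), C - s = (D.length : Int) - 1 →
      ((PySem.List.enumerate D s).map (fun p => p.2 * base ^ ((C - p.1).toNat))).sum
        = pvH base D := by
  induction D with
  | nil => intro s C _; simp [PySem.List.enumerate_nil, pvH]
  | cons d ds ih =>
      intro s C hC
      rw [PySem.List.enumerate_cons]
      simp only [List.map_cons, List.sum_cons]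
      have hlen : (C : Int) - (s + 1) = (ds.length : Int) - 1 := by
        simp only [List.length_cons] at hC; push_cast at hC ⊢; omega
      rw [ih (s + 1) C hlen]
      have hCs : (C - s).toNat = ds.length := by
        simp only [List.length_cons] at hC; push_cast at hC; omega
      rw [hCs,
        show pvH base (d :: ds) = ds.foldl (fun r d => r * base + d) (0 * base + d) from rfl,
        pvH_foldl_acc]
      ring

theorem pvConvert_eq_conv (num base : Int) : pvConvertToDec num base = pvConv base num := by
  rw [pvConv_eq_val, pvVal_eq_H_rev]
  unfold pvConvertToDec
  have hd : pvListInt num = (pvLsd num).reverse := by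
    unfold pvListInt; rw [pvListIntGo_eq]; simp
  simp only [hd]
  rw [PySem.List.foldl_add (PySem.List.enumerate (pvLsd num).reverse)
    (fun p => p.2 * base ^ ((((pvLsd num).reverse.length : Int) - 1 - p.1).toNat)) 0]
  rw [zero_add]
  exact pvSumPow base (pvLsd num).reverse 0 (((pvLsd num).reverse.length : Int) - 1) (by simp)

-- ===== VERDICT (by name: the statement is the Claim_ definition above) =====
theorem UFO_spec : Claim_equal_UFO := by
  intro N data octal _ _
  unfold Spec_UFO UFO UFO_alt
  simp only []
  rw [PySem.List.foldl_append_singleton_eq_map, List.nil_append]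
  exact List.map_congr_left fun i _ =>
    pvConvert_eq_conv (PySem.List.pyGetD data i 0) (if octal then 8 else 16)
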